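-- pv_equiv track=rewrite | github.com/tdda/tdda | tdda/rexpy/rexpy.py | left_parts
-- ===== SOURCE A (Python) =====
-- from collections import Counter, defaultdict, namedtuple, OrderedDict
--
-- def left_parts(patterns, fixed):
--     """
--     patterns is a list of patterns each consisting of a list of frags.
--
--     fixed is a list of ``(fragment, position)`` pairs, sorted on position,
--     specifying points at which to split the patterns.
--
--     This function returns a list of lists of pattern fragments,
--     split at each fixed position.
--     """
--     if not fixed:
--         return [patterns]
--     lastPos = -1
--     out = []
--     lstats = length_stats(patterns)
--     for (frag, pos) in fixed:
--         if pos > 0:  # Nothing to the left if it's position 0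
--             out.append([p[lastPos + 1:pos] for p in patterns])
-- #        out.append([p[pos:pos + 1] for p in patterns])  # the fixed bit
--         out.append([[p[pos]] for p in patterns])  # the fixed bit
--         lastPos = pos
--     if lastPos < lstats.max_length - 1:  # the end, if there's anything left
--         out.append([p[lastPos + 1:] for p in patterns])
--     return out
--
-- def length_stats(patterns):
--     """
--     Given a list of patterns, returns named tuple containing
--
--         ``all_same_length``:
--             boolean, True if all patterns are the same length
--         ``max_length``:
--             length of the longest pattern in patterns
--     """
--     lengths = [len(p) for p in patterns]
--     L0 = lengths[0] if lengths else 0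
--     LS = namedtuple('lengthstats', 'all_same_length max_length')
--     return LS(all(L == L0 for L in lengths), max(lengths) if lengths else 0)
-- ===== SOURCE B (Python) =====
-- def left_parts(patterns, fixed):
--     if not fixed:
--         return [patterns]
--     max_length = max((len(p) for p in patterns), default=0)
--
--     def segments(p):
--         # the segments of ONE pattern, in output order
--         segs = []
--         last = -1
--         for _frag, pos in fixed:
--             if pos > 0:
--                 segs.append(p[last + 1:pos])
--             segs.append([p[pos]])
--             last = pos
--         if last < max_length - 1:
--             segs.append(p[last + 1:])
--         return segs
--
--     if not patterns:
--         # no rows to transpose: emit the right number of empty groups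
--         last = fixed[-1][1]
--         n = sum(2 if pos > 0 else 1 for _frag, pos in fixed)
--         n += 1 if last < max_length - 1 else 0
--         return [[] for _ in range(n)]
--     return [list(group) for group in zip(*[segments(p) for p in patterns])]
-- ===== Notes on version B (the rewrite author's own statement) =====
-- stated objective: alternative
-- what changed: B works in pattern-major order: it builds each pattern's full list of segments independently and then transposes (zip) the per-pattern lists into per-group output, with the empty-patterns case handled by counting groups; A works group-major, appending one group of all patterns per boundary.
import Mathlib
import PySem

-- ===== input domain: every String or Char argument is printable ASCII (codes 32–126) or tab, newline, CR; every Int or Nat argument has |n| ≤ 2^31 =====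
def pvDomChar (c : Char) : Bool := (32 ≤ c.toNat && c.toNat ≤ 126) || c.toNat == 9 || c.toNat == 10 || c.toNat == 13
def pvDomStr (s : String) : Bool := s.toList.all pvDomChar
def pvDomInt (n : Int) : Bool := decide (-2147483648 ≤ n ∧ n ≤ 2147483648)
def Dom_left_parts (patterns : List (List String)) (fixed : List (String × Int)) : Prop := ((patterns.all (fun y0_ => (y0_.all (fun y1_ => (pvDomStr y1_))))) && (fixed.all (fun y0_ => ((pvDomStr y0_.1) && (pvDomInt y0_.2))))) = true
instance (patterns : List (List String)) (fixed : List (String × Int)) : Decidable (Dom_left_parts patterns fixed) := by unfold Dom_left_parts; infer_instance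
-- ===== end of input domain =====

-- B traverses pattern-major (per-pattern segment lists, then a transpose) instead of A's
-- group-major loop; objective: alternative, same cost.

-- ===== PORT A =====
-- port of length_stats: (all_same_length, max_length)
def lengthStats (patterns : List (List String)) : Bool × Int :=
  let lengths := patterns.map (fun p => (p.length : Int))
  let L0 := match lengths with | [] => (0 : Int) | l :: _ => l
  (lengths.all (fun L => L == L0), (PySem.List.max? lengths (fun x => x)).getD 0)

-- the 'for (frag, pos) in fixed' loop of A, threading lastPos; returns (out-suffix, final lastPos)
def lpLoop (patterns : List (List String)) (fixed : List (String × Int)) (lastPos : Int) :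
    List (List (List String)) × Int :=
  match fixed with
  | [] => ([], lastPos)
  | (_, pos) :: rest =>
      let r := lpLoop patterns rest pos
      ((if pos > 0 then [patterns.map (fun p => PySem.List.slice p (some (lastPos + 1)) (some pos))] else [])
        ++ [patterns.map (fun p => [(PySem.List.pyGet? p pos).getD ""])]  -- p[pos]; Pre_ excludes the IndexError
        ++ r.1, r.2)

def left_parts (patterns : List (List String)) (fixed : List (String × Int)) : List (List (List String)) :=
  if fixed = [] then [patterns]
  else
    let lstats := lengthStats patterns
    let r := lpLoop patterns fixed (-1)
    r.1 ++ (if r.2 < lstats.2 - 1 then [patterns.map (fun p => PySem.List.slice p (some (r.2 + 1)) none)] else [])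

-- ===== PORT B =====
-- the inner loop of Source B's segments(p): segments of ONE pattern; returns (segs, last)
def segLoop (p : List String) (fixed : List (String × Int)) (last : Int) :
    List (List String) × Int :=
  match fixed with
  | [] => ([], last)
  | (_, pos) :: rest =>
      let r := segLoop p rest pos
      ((if pos > 0 then [PySem.List.slice p (some (last + 1)) (some pos)] else [])
        ++ [[(PySem.List.pyGet? p pos).getD ""]]  -- [p[pos]]; Pre_ excludes the IndexError
        ++ r.1, r.2)

-- Source B's segments(p): the loop plus the optional tail segment
def segmentsOf (maxLen : Int) (fixed : List (String × Int)) (p : List String) : List (List String) :=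
  let r := segLoop p fixed (-1)
  r.1 ++ (if r.2 < maxLen - 1 then [PySem.List.slice p (some (r.2 + 1)) none] else [])

-- zip(*rows): take the heads of all rows (none if any row is empty)
def headsTails {α : Type} (rows : List (List α)) : Option (List α × List (List α)) :=
  match rows with
  | [] => some ([], [])
  | [] :: _ => none
  | (x :: xs) :: rest => (headsTails rest).map (fun ht => (x :: ht.1, xs :: ht.2))

theorem headsTails_sum_lt {α : Type} (r : List α) (rows : List (List α)) (hs : List α)
    (ts : List (List α)) (h : headsTails (r :: rows) = some (hs, ts)) :
    (ts.map List.length).sum < ((r :: rows).map List.length).sum := by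
  induction rows generalizing r hs ts with
  | nil =>
      match r with
      | [] => simp [headsTails] at h
      | x :: xs =>
          simp [headsTails] at h
          obtain ⟨_, h2⟩ := h
          simp [← h2]
  | cons r2 rest ih =>
      match r with
      | [] => simp [headsTails] at h
      | x :: xs =>
          simp only [headsTails, Option.map_eq_some_iff] at h
          obtain ⟨⟨hs', ts'⟩, hrec, heq⟩ := h
          have := ih r2 hs' ts' hrec
          cases heq
          simp at this ⊢
          omega

-- zip(*rows) for a nonempty rows list; zip() of nothing is empty
def zipStar {α : Type} (rows : List (List α)) : List (List α) :=
  match rows with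
  | [] => []
  | r :: rest =>
      match h : headsTails (r :: rest) with
      | none => []
      | some (hs, ts) => hs :: zipStar ts
termination_by (rows.map List.length).sum
decreasing_by exact headsTails_sum_lt r rest hs ts h

def left_parts_alt (patterns : List (List String)) (fixed : List (String × Int)) : List (List (List String)) :=
  if fixed = [] then [patterns]
  else
    let maxLen := (PySem.List.max? (patterns.map (fun p => (p.length : Int))) (fun x => x)).getD 0
    if patterns = [] then
      let last := ((PySem.List.pyGet? fixed (-1)).map Prod.snd).getD 0
      let n := (fixed.map (fun fp => if fp.2 > 0 then (2 : Int) else 1)).sum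
                 + (if last < maxLen - 1 then 1 else 0)
      (PySem.List.pyRange 0 n 1).map (fun _ => [])
    else zipStar (patterns.map (fun p => segmentsOf maxLen fixed p))

-- ===== PRECONDITION & SPEC =====
-- Pre_ excludes exactly the inputs where A raises IndexError: some fixed position is
-- out of range (Python indexing, negatives allowed) for some pattern.
def Pre_left_parts (patterns : List (List String)) (fixed : List (String × Int)) : Prop :=
  ∀ fp ∈ fixed, ∀ p ∈ patterns, -(p.length : Int) ≤ fp.2 ∧ fp.2 < (p.length : Int)
instance (patterns : List (List String)) (fixed : List (String × Int)) : Decidable (Pre_left_parts patterns fixed) := by unfold Pre_left_parts; infer_instance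
def pvWitness_left_parts : List (List String) × (List (String × Int)) :=
  ([["a", "b", "c"], ["x", "y", "z"]], [("a", 1)])

def Spec_left_parts (patterns : List (List String)) (fixed : List (String × Int)) (out : List (List (List String))) : Prop := out = left_parts_alt patterns fixed
instance (patterns : List (List String)) (fixed : List (String × Int)) (out : List (List (List String))) : Decidable (Spec_left_parts patterns fixed out) := by unfold Spec_left_parts; infer_instance

-- ===== CLAIM (what is proved, stated in full; the proofs are below) =====
def Claim_equal_left_parts : Prop := ∀ (patterns : List (List String)) (fixed : List (String × Int)), Dom_left_parts patterns fixed → Pre_left_parts patterns fixed → Spec_left_parts patterns fixed (left_parts patterns fixed)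

-- ===== LEMMAS AND PROOFS =====

-- proof-only description of one output group, common to both sides
inductive Seg where
  | rng (a b : Int)
  | fix (pos : Int)
  | tail (a : Int)
deriving DecidableEq, Repr

def segExtract (p : List String) : Seg → List String
  | Seg.rng a b => PySem.List.slice p (some a) (some b)
  | Seg.fix pos => [(PySem.List.pyGet? p pos).getD ""]
  | Seg.tail a => PySem.List.slice p (some a) none

def planLoop (fixed : List (String × Int)) (last : Int) : List Seg × Int :=
  match fixed with
  | [] => ([], last)
  | (_, pos) :: rest =>
      let r := planLoop rest pos
      ((if pos > 0 then [Seg.rng (last + 1) pos] else []) ++ [Seg.fix pos] ++ r.1, r.2)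

-- A's loop is the group-major extraction of the plan
theorem lpLoop_eq_plan (patterns : List (List String)) (fixed : List (String × Int)) (lastPos : Int) :
    lpLoop patterns fixed lastPos =
      ((planLoop fixed lastPos).1.map (fun s => patterns.map (fun p => segExtract p s)),
       (planLoop fixed lastPos).2) := by
  induction fixed generalizing lastPos with
  | nil => simp [lpLoop, planLoop]
  | cons hd tl ih =>
      obtain ⟨frag, pos⟩ := hd
      simp only [lpLoop, planLoop, ih pos]
      by_cases h : pos > 0 <;> simp [h, segExtract]

-- B's per-pattern loop is the pattern-major extraction of the same plan
theorem segLoop_eq_plan (p : List String) (fixed : List (String × Int)) (last : Int) :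
    segLoop p fixed last =
      ((planLoop fixed last).1.map (segExtract p), (planLoop fixed last).2) := by
  induction fixed generalizing last with
  | nil => simp [segLoop, planLoop]
  | cons hd tl ih =>
      obtain ⟨frag, pos⟩ := hd
      simp only [segLoop, planLoop, ih pos]
      by_cases h : pos > 0 <;> simp [h, segExtract]

theorem headsTails_map_cons {α β : Type} (patterns : List β) (f g : β → List α) (x : β → α)
    : headsTails (patterns.map (fun p => x p :: f p))
      = some (patterns.map x, patterns.map f) := by
  induction patterns with
  | nil => simp [headsTails]
  | cons p rest ih => simp [headsTails, ih]

theorem zipStar_eq_none {α : Type} (r : List α) (rest : List (List α))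
    (h : headsTails (r :: rest) = none) : zipStar (r :: rest) = [] := by
  rw [zipStar.eq_def]
  split
  · next heq => cases heq
  · next r' rest' heq =>
      injection heq with h1 h2
      subst h1; subst h2
      split
      · rfl
      · next hs2 ts2 heq2 => rw [h] at heq2; cases heq2

theorem zipStar_eq_some {α : Type} (r : List α) (rest : List (List α)) (hs : List α)
    (ts : List (List α)) (h : headsTails (r :: rest) = some (hs, ts)) :
    zipStar (r :: rest) = hs :: zipStar ts := by
  rw [zipStar.eq_def]
  split
  · next heq => cases heq
  · next r' rest' heq =>
      injection heq with h1 h2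
      subst h1; subst h2
      split
      · next heq2 => rw [h] at heq2; cases heq2
      · next hs2 ts2 heq2 =>
          rw [h] at heq2
          injection heq2 with h3
          injection h3 with h4 h5
          rw [h4, h5]

-- transposing pattern-major extraction gives group-major extraction
theorem zipStar_map_map {α β : Type} (patterns : List β) (segs : List Seg)
    (g : β → Seg → α) (hne : patterns ≠ []) :
    zipStar (patterns.map (fun p => segs.map (g p))) = segs.map (fun s => patterns.map (fun p => g p s)) := by
  induction segs with
  | nil =>
      match patterns, hne with
      | p :: rest, _ =>
          simp only [List.map_nil, List.map_cons]
          exact zipStar_eq_none _ _ (by simp [headsTails])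
  | cons s rest ih =>
      match patterns, hne with
      | p0 :: ps, _ =>
          rw [show ((p0 :: ps).map fun p => (s :: rest).map (g p))
                = (p0 :: ps).map (fun p => g p s :: rest.map (g p)) by simp]
          rw [List.map_cons]
          rw [zipStar_eq_some _ _ ((p0 :: ps).map (fun p => g p s))
                ((p0 :: ps).map (fun p => rest.map (g p)))
                (by rw [← List.map_cons]
                    exact headsTails_map_cons (p0 :: ps) (fun p => rest.map (g p))
                      (fun _ => []) (fun p => g p s))]
          rw [ih]
          simp

-- the number of groups of the plan
theorem planLoop_length (fixed : List (String × Int)) (last : Int) :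
    ((planLoop fixed last).1.length : Int)
      = (fixed.map (fun fp => if fp.2 > 0 then (2 : Int) else 1)).sum := by
  induction fixed generalizing last with
  | nil => simp [planLoop]
  | cons hd tl ih =>
      obtain ⟨frag, pos⟩ := hd
      simp only [planLoop, List.map_cons, List.sum_cons, ← ih pos]
      by_cases h : pos > 0 <;> simp [h] <;> omega

-- the final lastPos of the plan is the position of the last fixed pair
theorem planLoop_snd (fixed : List (String × Int)) (last : Int) :
    (planLoop fixed last).2 = ((fixed.map Prod.snd).getLast?).getD last := by
  induction fixed generalizing last with
  | nil => simp [planLoop]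
  | cons hd tl ih =>
      obtain ⟨frag, pos⟩ := hd
      simp only [planLoop, ih pos, List.map_cons]
      cases h : (tl.map Prod.snd).getLast? with
      | none =>
          have h0 : tl.map Prod.snd = [] := List.getLast?_eq_none_iff.mp h
          simp [h0]
      | some v => simp [List.getLast?_cons, h]

theorem pyRange_map_const {α : Type} (n : Int) (c : α) (hn : 0 ≤ n) :
    (PySem.List.pyRange 0 n 1).map (fun _ => c) = List.replicate n.toNat c := by
  rw [show n = ((n.toNat : Nat) : Int) by omega, PySem.List.pyRange_zero_natCast, List.map_map]
  apply List.eq_replicate_iff.mpr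
  refine ⟨by simp; omega, ?_⟩
  intro b hb; simp at hb; exact hb.2.symm

theorem countSum_nonneg (fixed : List (String × Int)) :
    0 ≤ (fixed.map (fun fp => if fp.2 > 0 then (2 : Int) else 1)).sum := by
  induction fixed with
  | nil => simp
  | cons a b ih => simp only [List.map_cons, List.sum_cons]; split <;> omega

-- readable abbreviations for the proofs
def maxLenOf (patterns : List (List String)) : Int :=
  (PySem.List.max? (patterns.map fun p => ((p.length : Int))) (fun x => x)).getD 0

def planFull (fixed : List (String × Int)) (M : Int) : List Seg :=
  (planLoop fixed (-1)).1 ++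
    (if (planLoop fixed (-1)).2 < M - 1 then [Seg.tail ((planLoop fixed (-1)).2 + 1)] else [])

theorem A_eq (patterns : List (List String)) (fixed : List (String × Int)) (h : fixed ≠ []) :
    left_parts patterns fixed
      = (planFull fixed (maxLenOf patterns)).map (fun s => patterns.map (fun p => segExtract p s)) := by
  unfold left_parts lengthStats planFull maxLenOf
  rw [if_neg h, lpLoop_eq_plan]
  by_cases ht : (planLoop fixed (-1)).2
      < (PySem.List.max? (patterns.map fun p => ((p.length : Int))) (fun x => x)).getD 0 - 1 <;>
    simp [ht, segExtract]

theorem B_segments (patterns : List (List String)) (fixed : List (String × Int)) (p : List String) :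
    segmentsOf (maxLenOf patterns) fixed p
      = (planFull fixed (maxLenOf patterns)).map (segExtract p) := by
  unfold segmentsOf planFull
  rw [segLoop_eq_plan]
  by_cases ht : (planLoop fixed (-1)).2 < maxLenOf patterns - 1 <;> simp [ht, segExtract]

theorem B_eq_nonempty (patterns : List (List String)) (fixed : List (String × Int))
    (h : fixed ≠ []) (hp : patterns ≠ []) :
    left_parts_alt patterns fixed
      = (planFull fixed (maxLenOf patterns)).map (fun s => patterns.map (fun p => segExtract p s)) := by
  unfold left_parts_alt
  rw [if_neg h]
  simp only [if_neg hp]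
  show zipStar (patterns.map (fun p => segmentsOf (maxLenOf patterns) fixed p)) = _
  rw [List.map_congr_left (fun p _ => B_segments patterns fixed p)]
  exact zipStar_map_map patterns _ (fun p s => segExtract p s) hp

-- ===== VERDICT (by name: the statement is the Claim_ definition above) =====
theorem left_parts_spec : Claim_equal_left_parts := by
  intro patterns fixed _ _
  unfold Spec_left_parts
  by_cases h : fixed = []
  · simp [left_parts, left_parts_alt, h]
  · by_cases hp : patterns = []
    · -- empty patterns: A's groups are all []; B counts them
      subst hp
      rw [A_eq [] fixed h]
      unfold left_parts_alt
      rw [if_neg h]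
      simp only [List.map_nil]
      have hM2 : ((PySem.List.max? ([] : List Int) (fun x => x)).getD 0) = 0 := by
        simp [PySem.List.max?]
      have hM : maxLenOf ([] : List (List String)) = 0 := by
        simp [maxLenOf, hM2]
      simp only [hM, hM2]
      have hlast : ((PySem.List.pyGet? fixed (-1)).map Prod.snd).getD 0
          = (planLoop fixed (-1)).2 := by
        rw [planLoop_snd, PySem.List.pyGet?_neg_one, ← List.getLast?_map]
        cases hg : (fixed.map Prod.snd).getLast? with
        | none => exact absurd (by simpa using List.getLast?_eq_none_iff.mp hg) h
        | some v => simp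
      rw [hlast]
      have hn0 := countSum_nonneg fixed
      have hlen := planLoop_length fixed (-1)
      rw [pyRange_map_const _ _ (by split <;> omega)]
      apply List.eq_replicate_iff.mpr
      refine ⟨?_, ?_⟩
      · unfold planFull
        by_cases ht : (planLoop fixed (-1)).2 < (0:Int) - 1 <;>
          simp only [ht, ite_true, ite_false, List.length_append,
            List.length_map, List.length_cons, List.length_nil] <;> omega
      · intro b hb
        rcases List.mem_map.mp hb with ⟨s, _, rfl⟩
        rfl
    · rw [A_eq patterns fixed h, B_eq_nonempty patterns fixed h hp]
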